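-- pv_equiv track=rewrite | github.com/piperendervt-glitch/bird-multimodal-pipeline | src/bird_phase3_audio_fixup.py | generate_hyphen_variants
-- ===== SOURCE A (Python) =====
-- def generate_hyphen_variants(name):
--     """単語間の任意の箇所にハイフンを入れた派生名を生成（重複なし）"""
--     words = name.split()
--     if len(words) < 2:
--         return []
--     results = set()
--     positions = list(range(len(words) - 1))  # 各境界（word_i と word_{i+1} の間）
--     # 1 箇所にハイフンを入れるパターンのみ考慮（複数入れるより現実的）
--     for p in positions:
--         w = words.copy()
--         w[p] = w[p] + "-" + w[p + 1]
--         del w[p + 1]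
--         results.add(" ".join(w))
--     return sorted(results)
-- ===== SOURCE B (Python) =====
-- def generate_hyphen_variants(name):
--     """Same variants, built by one join then string slicing at each space."""
--     words = name.split()
--     if len(words) < 2:
--         return []
--     s = " ".join(words)
--     variants = {s[:i] + "-" + s[i + 1:] for i, c in enumerate(s) if c == " "}
--     return sorted(variants)
-- ===== Notes on version B (the rewrite author's own statement) =====
-- stated objective: idiomatic
-- what changed: Instead of re-copying the word list, splicing words and re-joining at every boundary, B joins the words once and builds each variant by slicing the joined string at each space position (a set comprehension over enumerate), then sorts the set.
import Mathlib
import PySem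

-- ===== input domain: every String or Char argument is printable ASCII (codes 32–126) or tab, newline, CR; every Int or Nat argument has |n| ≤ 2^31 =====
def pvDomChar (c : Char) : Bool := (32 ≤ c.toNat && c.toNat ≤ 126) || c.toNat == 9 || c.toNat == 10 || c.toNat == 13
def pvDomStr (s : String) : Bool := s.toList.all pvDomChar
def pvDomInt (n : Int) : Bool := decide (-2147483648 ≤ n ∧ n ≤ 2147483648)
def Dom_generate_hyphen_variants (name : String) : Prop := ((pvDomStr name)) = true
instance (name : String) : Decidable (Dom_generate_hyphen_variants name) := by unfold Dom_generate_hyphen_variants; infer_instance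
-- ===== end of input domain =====

-- B returns A's exact value but builds each variant by slicing the once-joined string at
-- each space instead of copying/splicing/re-joining the word list per boundary (idiomatic).

-- ===== PORT A =====
def generate_hyphen_variants (name : String) : List String :=
  let words := PySem.Str.split₀ name
  if words.length < 2 then []
  else
    let positions := PySem.List.pyRange 0 ((words.length : Int) - 1) 1
    let results := positions.foldl (fun (results : PySem.Set String) p =>
      -- p is drawn from range(len(words)-1), so p and p+1 are always in range:
      -- the total forms pyGetD/pySetD and pop?'s .getD never take their defaults.
      let w := PySem.List.pySetD words p
        (PySem.List.pyGetD words p "" ++ "-" ++ PySem.List.pyGetD words (p + 1) "")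
      let w := ((PySem.List.pop? w (p + 1)).map (·.2)).getD []   -- del w[p+1]
      PySem.Set.add results (PySem.Str.join " " w)) PySem.Set.empty
    PySem.List.sorted results (fun x => x) false

-- ===== PORT B =====
def generate_hyphen_variants_alt (name : String) : List String :=
  let words := PySem.Str.split₀ name
  if words.length < 2 then []
  else
    let s := PySem.Str.join " " words
    let variants := PySem.Set.ofList
      (((PySem.List.enumerate s.toList 0).filter (fun ic => ic.2 == ' ')).map
        (fun ic => PySem.Str.slice s none (some ic.1) ++ "-" ++ PySem.Str.slice s (some (ic.1 + 1)) none))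
    PySem.List.sorted variants (fun x => x) false

-- ===== PRECONDITION & SPEC =====
def Spec_generate_hyphen_variants (name : String) (out : List String) : Prop := out = generate_hyphen_variants_alt name
instance (name : String) (out : List String) : Decidable (Spec_generate_hyphen_variants name out) := by unfold Spec_generate_hyphen_variants; infer_instance

-- ===== CLAIM (what is proved, stated in full; the proofs are below) =====
def Claim_equal_generate_hyphen_variants : Prop := ∀ (name : String), Dom_generate_hyphen_variants name → Spec_generate_hyphen_variants name (generate_hyphen_variants name)

-- ===== LEMMAS AND PROOFS =====

-- join with a single space, at the char level
def pvJ (ws : List (List Char)) : List Char := PySem.Chars.join [' '] ws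

-- A's variant at boundary k, at the char level
def pvAvar (W : List (List Char)) (k : Nat) : List Char :=
  pvJ ((W.set k (W.getD k [] ++ '-' :: W.getD (k + 1) [])).eraseIdx (k + 1))

-- the (index, char) pairs of the spaces of cs, counting indices from s
def pvF (cs : List Char) (s : Int) : List (Int × Char) :=
  (PySem.List.enumerate cs s).filter (fun ic => ic.2 == ' ')

lemma pvJ_cons {w : List Char} {ws : List (List Char)} (h : ws ≠ []) :
    pvJ (w :: ws) = w ++ ' ' :: pvJ ws := by
  cases ws with
  | nil => exact absurd rfl h
  | cons v vs => simp [pvJ, PySem.Chars.join, List.intercalate]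

lemma pvJ_singleton (w : List Char) : pvJ [w] = w := by
  simp [pvJ, PySem.Chars.join, List.intercalate]

lemma pvJ_cons_append (a b : List Char) (ws : List (List Char)) :
    pvJ ((a ++ b) :: ws) = a ++ pvJ (b :: ws) := by
  cases ws with
  | nil => simp [pvJ, PySem.Chars.join, List.intercalate]
  | cons v vs => simp [pvJ, PySem.Chars.join, List.intercalate]

lemma pvF_cons_space (u : List Char) (s : Int) :
    pvF (' ' :: u) s = (s, ' ') :: pvF u (s + 1) := by
  simp [pvF, PySem.List.enumerate_cons]

lemma pvF_append_nospace {w : List Char} (hw : ∀ c ∈ w, c ≠ ' ') (u : List Char) (s : Int) :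
    pvF (w ++ u) s = pvF u (s + w.length) := by
  induction w generalizing s with
  | nil => simp [pvF]
  | cons c w ih =>
    have hc : c ≠ ' ' := hw c (by simp)
    rw [List.cons_append]
    rw [show pvF (c :: (w ++ u)) s = pvF (w ++ u) (s + 1) by
      simp [pvF, PySem.List.enumerate_cons, hc]]
    rw [ih (fun x hx => hw x (by simp [hx]))]
    congr 1
    simp
    ring

lemma pvF_nospace {w : List Char} (hw : ∀ c ∈ w, c ≠ ' ') (s : Int) : pvF w s = [] := by
  have := pvF_append_nospace hw [] s
  simpa [pvF] using this

lemma pvAvar_cons (w : List Char) (ws : List (List Char)) (k : Nat)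
    (hk : k + 1 < ws.length) :
    pvAvar (w :: ws) (k + 1) = w ++ ' ' :: pvAvar ws k := by
  unfold pvAvar
  simp only [List.set_cons_succ, List.getD_cons_succ, List.eraseIdx_cons_succ]
  refine pvJ_cons ?_
  intro h
  have h2 := congrArg List.length h
  rw [List.length_eraseIdx] at h2
  simp [hk] at h2
  omega

lemma pvAvar_zero (w v : List Char) (vs : List (List Char)) :
    pvAvar (w :: v :: vs) 0 = w ++ '-' :: pvJ (v :: vs) := by
  unfold pvAvar
  simp only [List.set_cons_zero, List.getD_cons_zero, List.getD_cons_succ,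
    List.eraseIdx_cons_succ, List.eraseIdx_cons_zero]
  rw [pvJ_cons_append]
  rw [show ('-' :: v) = ['-'] ++ v from rfl, pvJ_cons_append]
  rfl

lemma pv_drop_app_succ {α : Type} (a : List α) (x : α) (b : List α) :
    (a ++ x :: b).drop (a.length + 1) = b := by
  induction a with
  | nil => simp
  | cons y a ih => simp [ih]

-- split() produces whitespace-free words
lemma pvGoOK : ∀ (s cur : List Char) (acc : List (List Char)),
    (∀ w ∈ acc, ∀ c ∈ w, PySem.Chars.isspace c = false) →
    (∀ c ∈ cur, PySem.Chars.isspace c = false) →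
    ∀ w ∈ PySem.Chars.split₀.go s cur acc, ∀ c ∈ w, PySem.Chars.isspace c = false := by
  intro s
  induction s with
  | nil =>
    intro cur acc hacc hcur w hw
    simp only [PySem.Chars.split₀.go] at hw
    split at hw
    · exact hacc w (by simpa using hw)
    · rw [List.mem_reverse, List.mem_cons] at hw
      rcases hw with h | h
      · subst h; intro c hc; exact hcur c (by simpa using hc)
      · exact hacc w h
  | cons c rest ih =>
    intro cur acc hacc hcur w hw
    simp only [PySem.Chars.split₀.go] at hw
    by_cases hsp : PySem.Chars.isspace c = true
    · rw [if_pos hsp] at hw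
      split at hw
      · exact ih [] acc hacc (by simp) w hw
      · refine ih [] (cur.reverse :: acc) ?_ (by simp) w hw
        intro u hu
        rcases List.mem_cons.mp hu with h | h
        · subst h; intro x hx; exact hcur x (by simpa using hx)
        · exact hacc u h
    · rw [if_neg hsp] at hw
      refine ih (c :: cur) acc hacc ?_ w hw
      intro x hx
      rcases List.mem_cons.mp hx with h | h
      · subst h; simpa using hsp
      · exact hcur x h

lemma pvSplitOK (s : List Char) (w : List Char) (hw : w ∈ PySem.Chars.split₀ s) :
    ∀ c ∈ w, PySem.Chars.isspace c = false :=
  pvGoOK s [] [] (by simp) (by simp) w hw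

-- the heart: B's slice-at-each-space pass produces exactly A's per-boundary variants
lemma pvMain : ∀ (W : List (List Char)) (pre : List Char), 2 ≤ W.length →
    (∀ u ∈ W, ∀ c ∈ u, c ≠ ' ') →
    (pvF (pvJ W) (pre.length : Int)).map
      (fun ic => PySem.List.slice (pre ++ pvJ W) none (some ic.1) ++
        '-' :: PySem.List.slice (pre ++ pvJ W) (some (ic.1 + 1)) none)
    = (List.range (W.length - 1)).map (fun k => pre ++ pvAvar W k) := by
  intro W
  induction W with
  | nil => intro pre h; simp at h
  | cons w ws ih =>
    intro pre hlen hsf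
    match ws, ih, hlen, hsf with
    | v :: vs, ih, hlen, hsf =>
    have hw : ∀ c ∈ w, c ≠ ' ' := hsf w (by simp)
    have hJ : pvJ (w :: v :: vs) = w ++ ' ' :: pvJ (v :: vs) := pvJ_cons (by simp)
    rw [hJ, pvF_append_nospace hw, pvF_cons_space, List.map_cons]
    have hr : (w :: v :: vs).length - 1 = vs.length + 1 := by simp
    rw [hr, List.range_succ_eq_map, List.map_cons, List.map_map]
    have hassoc : pre ++ (w ++ ' ' :: pvJ (v :: vs)) = (pre ++ w) ++ ' ' :: pvJ (v :: vs) := by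
      simp
    congr 1
    · -- head: the slice at the first space is A's variant for boundary 0
      rw [hassoc, pvAvar_zero]
      rw [show ((pre.length : Int) + (w.length : Int)) = (((pre ++ w).length : Nat) : Int) by
        simp]
      rw [PySem.List.slice_to_natCast]
      rw [show (((pre ++ w).length : Nat) : Int) + 1 = ((((pre ++ w).length + 1 : Nat)) : Int) by
        push_cast; ring]
      rw [PySem.List.slice_from_natCast]
      rw [List.take_left, pv_drop_app_succ]
      simp
    · -- tail: induction hypothesis with the prefix grown by w and the space
      cases vs with
      | nil =>
        rw [show pvJ [v] = v from pvJ_singleton v]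
        rw [pvF_nospace (hsf v (by simp))]
        simp
      | cons u us =>
        have hIH := ih (pre ++ w ++ [' ']) (by simp)
          (fun x hx => hsf x (List.mem_cons_of_mem _ hx))
        rw [show ((((pre ++ w ++ [' ']).length : Nat)) : Int)
              = (pre.length : Int) + (w.length : Int) + 1 by simp; ring] at hIH
        rw [show (pre ++ w ++ [' ']) ++ pvJ (v :: u :: us)
              = pre ++ (w ++ ' ' :: pvJ (v :: u :: us)) by simp] at hIH
        rw [hIH]
        rw [show (v :: u :: us).length - 1 = (u :: us).length from rfl]
        refine List.map_congr_left ?_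
        intro k hk
        rw [List.mem_range] at hk
        simp only [Function.comp]
        rw [pvAvar_cons w (v :: u :: us) k (by simpa using Nat.succ_lt_succ hk)]
        simp

lemma pvStrJoin (l : List String) : PySem.Str.join " " l = String.ofList (pvJ (l.map String.toList)) := by
  rw [PySem.Str.join]; rfl

set_option maxHeartbeats 1000000 in
lemma pvFinal (name : String) : generate_hyphen_variants name = generate_hyphen_variants_alt name := by
  unfold generate_hyphen_variants generate_hyphen_variants_alt
  by_cases hlt : (PySem.Str.split₀ name).length < 2
  · rw [if_pos hlt, if_pos hlt]
  · rw [if_neg hlt, if_neg hlt]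
    have hn : 2 ≤ (PySem.Str.split₀ name).length := not_lt.mp hlt
    set words := PySem.Str.split₀ name with hwords
    set W : List (List Char) := words.map String.toList with hW
    have hWeq : W = PySem.Chars.split₀ name.toList := by
      rw [hW, hwords]
      show (List.map String.ofList _).map String.toList = _
      rw [List.map_map]
      simp [Function.comp_def]
    have hsf : ∀ u ∈ W, ∀ c ∈ u, c ≠ ' ' := by
      intro u hu c hc hsp
      have h1 := pvSplitOK name.toList u (hWeq ▸ hu) c hc
      subst hsp
      simp [show PySem.Chars.isspace ' ' = true from by decide] at h1
    have hlenW : W.length = words.length := by simp [hW]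
    show PySem.List.sorted ((PySem.List.pyRange 0 ((words.length : Int) - 1) 1).foldl
        (fun (results : PySem.Set String) p => PySem.Set.add results (PySem.Str.join " "
          (((PySem.List.pop? (PySem.List.pySetD words p
              (PySem.List.pyGetD words p "" ++ "-" ++ PySem.List.pyGetD words (p + 1) "")) (p + 1)).map (·.2)).getD [])))
        PySem.Set.empty) (fun x => x) false
      = PySem.List.sorted (PySem.Set.ofList
          (((PySem.List.enumerate (PySem.Str.join " " words).toList 0).filter (fun ic => ic.2 == ' ')).map
            (fun ic => PySem.Str.slice (PySem.Str.join " " words) none (some ic.1) ++ "-" ++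
              PySem.Str.slice (PySem.Str.join " " words) (some (ic.1 + 1)) none)))
          (fun x => x) false
    rw [show (PySem.List.pyRange 0 ((words.length : Int) - 1) 1).foldl (fun (results : PySem.Set String) p =>
        PySem.Set.add results (PySem.Str.join " "
          (((PySem.List.pop? (PySem.List.pySetD words p
              (PySem.List.pyGetD words p "" ++ "-" ++ PySem.List.pyGetD words (p + 1) "")) (p + 1)).map (·.2)).getD [])))
        PySem.Set.empty
      = PySem.Set.ofList ((PySem.List.pyRange 0 ((words.length : Int) - 1) 1).map (fun p =>
          PySem.Str.join " "
          (((PySem.List.pop? (PySem.List.pySetD words p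
              (PySem.List.pyGetD words p "" ++ "-" ++ PySem.List.pyGetD words (p + 1) "")) (p + 1)).map (·.2)).getD []))) by
      rw [PySem.Set.ofList_eq_foldl, List.foldl_map]
      rfl]
    have hA : (PySem.List.pyRange 0 ((words.length : Int) - 1) 1).map (fun p =>
          PySem.Str.join " "
          (((PySem.List.pop? (PySem.List.pySetD words p
              (PySem.List.pyGetD words p "" ++ "-" ++ PySem.List.pyGetD words (p + 1) "")) (p + 1)).map (·.2)).getD []))
        = (List.range (words.length - 1)).map (fun k => String.ofList (pvAvar W k)) := by
      rw [PySem.List.pyRange_one, List.map_map]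
      rw [show ((words.length : Int) - 1 - 0).toNat = words.length - 1 by omega]
      refine List.map_congr_left ?_
      intro k hk
      rw [List.mem_range] at hk
      simp only [Function.comp]
      rw [show (0 : Int) + (k : Int) = ((k : Nat) : Int) by ring]
      rw [PySem.List.pySetD_natCast, PySem.List.pyGetD_natCast]
      rw [show ((k : Nat) : Int) + 1 = (((k + 1 : Nat)) : Int) by push_cast; ring]
      rw [PySem.List.pyGetD_natCast]
      rw [PySem.List.pop?_natCast _ (k + 1) (by simp [List.length_set]; omega)]
      simp only [Option.map_some, Option.getD_some]
      have hval : (words.getD k "" ++ "-" ++ words.getD (k + 1) "").toList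
          = W.getD k [] ++ '-' :: W.getD (k + 1) [] := by
        rw [String.toList_append, String.toList_append]
        rw [show (words.getD k "").toList = W.getD k [] by
          rw [hW, show ([] : List Char) = ("" : String).toList from rfl, List.getD_map]]
        rw [show (words.getD (k+1) "").toList = W.getD (k+1) [] by
          rw [hW, show ([] : List Char) = ("" : String).toList from rfl, List.getD_map]]
        simp
      rw [pvStrJoin]
      congr 1
      unfold pvAvar
      congr 1
      rw [← List.eraseIdx_map, List.map_set, hval]
    have hs : (PySem.Str.join " " words).toList = pvJ W := by
      rw [PySem.Str.toList_join, hW]; rfl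
    have hB : ((PySem.List.enumerate (PySem.Str.join " " words).toList 0).filter (fun ic => ic.2 == ' ')).map
        (fun ic => PySem.Str.slice (PySem.Str.join " " words) none (some ic.1) ++ "-" ++
          PySem.Str.slice (PySem.Str.join " " words) (some (ic.1 + 1)) none)
        = (List.range (words.length - 1)).map (fun k => String.ofList (pvAvar W k)) := by
      have hmap : ∀ ic : Int × Char,
          PySem.Str.slice (PySem.Str.join " " words) none (some ic.1) ++ "-" ++
            PySem.Str.slice (PySem.Str.join " " words) (some (ic.1 + 1)) none
          = String.ofList (PySem.List.slice (pvJ W) none (some ic.1) ++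
              '-' :: PySem.List.slice (pvJ W) (some (ic.1 + 1)) none) := by
        intro ic
        rw [← String.ofList_toList (s := _ ++ _ ++ _)]
        congr 1
        rw [String.toList_append, String.toList_append, PySem.Str.toList_slice,
          PySem.Str.toList_slice, hs]
        simp [PySem.Chars.slice_eq_listSlice]
      have h0 : (PySem.List.enumerate (PySem.Str.join " " words).toList 0).filter (fun ic => ic.2 == ' ')
          = pvF (pvJ W) 0 := by
        rw [hs]; rfl
      rw [h0]
      have hmain := pvMain W [] (by omega) hsf
      simp only [List.nil_append, List.length_nil, Nat.cast_zero] at hmain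
      calc (pvF (pvJ W) 0).map
            (fun ic => PySem.Str.slice (PySem.Str.join " " words) none (some ic.1) ++ "-" ++
              PySem.Str.slice (PySem.Str.join " " words) (some (ic.1 + 1)) none)
          = (pvF (pvJ W) 0).map (fun ic => String.ofList
              (PySem.List.slice (pvJ W) none (some ic.1) ++
                '-' :: PySem.List.slice (pvJ W) (some (ic.1 + 1)) none)) :=
            List.map_congr_left (fun ic _ => hmap ic)
        _ = ((pvF (pvJ W) 0).map (fun ic =>
              PySem.List.slice (pvJ W) none (some ic.1) ++
                '-' :: PySem.List.slice (pvJ W) (some (ic.1 + 1)) none)).map String.ofList := by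
            rw [List.map_map]; rfl
        _ = (List.range (words.length - 1)).map (fun k => String.ofList (pvAvar W k)) := by
            rw [hmain, List.map_map, hlenW]; rfl
    rw [hA, hB]

-- ===== VERDICT (by name: the statement is the Claim_ definition above) =====
theorem generate_hyphen_variants_spec : Claim_equal_generate_hyphen_variants := by
  intro name _
  show generate_hyphen_variants name = generate_hyphen_variants_alt name
  exact pvFinal name
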